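-- pv_equiv track=rewrite | github.com/cdhcsh/jungle-week03-algorithm | python/practice/20551(Sort 마스터 배지훈의 후계자).py | solve
-- ===== SOURCE A (Python) =====
-- from bisect import bisect_left
--
-- def solve(data:list,question:list)->list:
--     result = []
--     data.sort();
--     for q in question:
--         d = bisect_left(data,q)
--         if d < len(data) and data[d] == q : result.append(d)
--         else: result.append(-1)
--     return result
-- ===== SOURCE B (Python) =====
-- def solve(data: list, question: list) -> list:
--     data.sort()
--     idx = {}
--     for i, v in enumerate(data):
--         idx.setdefault(v, i)
--     return [idx.get(q, -1) for q in question]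
-- ===== Notes on version B (the rewrite author's own statement) =====
-- stated objective: alternative
-- what changed: Replaces the per-query binary search with a value->first-index dict built in one pass over the sorted data, so the query pass becomes plain table lookups.
import Mathlib
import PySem

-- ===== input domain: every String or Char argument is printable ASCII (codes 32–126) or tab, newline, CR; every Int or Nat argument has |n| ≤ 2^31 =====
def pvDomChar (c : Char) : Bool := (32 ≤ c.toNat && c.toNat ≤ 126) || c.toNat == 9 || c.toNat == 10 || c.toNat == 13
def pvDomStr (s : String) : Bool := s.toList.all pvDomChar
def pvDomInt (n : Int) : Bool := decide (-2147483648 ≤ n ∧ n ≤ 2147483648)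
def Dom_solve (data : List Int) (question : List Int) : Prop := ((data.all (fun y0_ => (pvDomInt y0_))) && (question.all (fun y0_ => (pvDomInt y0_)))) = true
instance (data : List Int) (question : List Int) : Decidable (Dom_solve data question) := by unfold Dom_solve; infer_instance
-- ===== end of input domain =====

-- B replaces A's per-query binary search with a value→first-index dict built in one pass over the sorted data (alternative algorithm).
-- Both A and B sort `data` in place (same mutation); the equivalence proved is about the return value.


-- ===== PORT A =====
def solve (data : List Int) (question : List Int) : List Int :=
  let s := PySem.List.sorted data (fun x => x)
  question.foldl (fun result q =>
    let d := PySem.List.bisectLeft s q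
    result ++ [if h : d < s.length then (if s[d] = q then (d : Int) else -1) else -1]) []

-- ===== PORT B =====
def solve_alt (data : List Int) (question : List Int) : List Int :=
  let s := PySem.List.sorted data (fun x => x)
  let idx := (PySem.List.enumerate s).foldl (fun d p => d.setdefault p.2 p.1) PySem.Dict.empty
  question.map (fun q => idx.getD q (-1))

-- ===== PRECONDITION & SPEC =====
def Spec_solve (data : List Int) (question : List Int) (out : List Int) : Prop := out = solve_alt data question
instance (data : List Int) (question : List Int) (out : List Int) : Decidable (Spec_solve data question out) := by unfold Spec_solve; infer_instance

-- ===== CLAIM (what is proved, stated in full; the proofs are below) =====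
def Claim_equal_solve : Prop := ∀ (data : List Int) (question : List Int), Dom_solve data question → Spec_solve data question (solve data question)

-- ===== LEMMAS AND PROOFS =====

-- The setdefault fold over 'enumerate s k' keeps d's bindings and adds, for each new
-- value, its first index in s shifted by k.
theorem setdefault_fold_get? (s : List Int) : ∀ (k : Int) (d : PySem.Dict Int Int) (v : Int),
    ((PySem.List.enumerate s k).foldl (fun d p => d.setdefault p.2 p.1) d).get? v
      = (d.get? v).or ((PySem.List.index? s v).map (fun j => k + (j : Int))) := by
  induction s with
  | nil =>
      intro k d v
      simp [PySem.List.enumerate_nil, PySem.List.index?]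
  | cons a t ih =>
      intro k d v
      rw [PySem.List.enumerate_cons]
      simp only [List.foldl_cons]
      rw [ih (k + 1) (d.setdefault a k) v]
      by_cases hva : v = a
      · subst hva
        rw [PySem.Dict.get?_setdefault_self]
        rw [show PySem.List.index? (v :: t) v = some 0 from PySem.List.index?_cons_self v t]
        cases d.get? v <;> simp
      · rw [PySem.Dict.get?_setdefault_of_ne d k hva]
        rw [PySem.List.index?_cons_of_ne t (fun h => hva h.symm)]
        cases PySem.List.index? t v with
        | none => simp
        | some j => cases d.get? v <;> simp <;> omega

-- A's per-query bisect result equals the first index of q in the sorted list (or -1).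
theorem bisect_core (s : List Int) (q : Int)
    (hsort : List.Pairwise (fun a b => a ≤ b) s)
    (hmono : ∀ (p q' : ℕ) (hpq : p ≤ q') (hq : q' < s.length), s[p]'(Nat.lt_of_le_of_lt hpq hq) ≤ s[q']) :
    (if h : PySem.List.bisectLeft s q < s.length then
        (if s[PySem.List.bisectLeft s q] = q then ((PySem.List.bisectLeft s q : ℕ) : Int) else -1)
      else -1)
      = ((PySem.List.index? s q).map (fun j => (j : Int))).getD (-1) := by
  obtain ⟨hle, hlt, hge⟩ := PySem.List.bisectLeft_spec s q hsort
  set c := PySem.List.bisectLeft s q with hc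
  by_cases hmem : q ∈ s
  · obtain ⟨j, hj⟩ : ∃ j, PySem.List.index? s q = some j :=
      Option.isSome_iff_exists.mp ((PySem.List.index?_isSome_iff s q).mpr hmem)
    obtain ⟨hjlen, hjval, hjmin⟩ := PySem.List.getElem_of_index?_eq_some hj
    have hcj : c ≤ j := by
      by_contra hlt'
      exact absurd hjval (ne_of_lt (hlt j hjlen (by omega)))
    have hclen : c < s.length := lt_of_le_of_lt hcj hjlen
    have hcq : s[c] = q := by
      have h1 : q ≤ s[c] := hge c hclen le_rfl
      have h2 : s[c] ≤ s[j] := hmono c j hcj hjlen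
      rw [hjval] at h2
      omega
    have hcje : c = j := by
      rcases lt_or_eq_of_le hcj with h | h
      · exact absurd hcq (hjmin c h)
      · exact h
    rw [dif_pos hclen, if_pos hcq, hj, hcje]
    rfl
  · have hidx : PySem.List.index? s q = none := (PySem.List.index?_eq_none_iff s q).mpr hmem
    rw [hidx]
    by_cases hclen : c < s.length
    · have hne : s[c] ≠ q := fun h => hmem (h ▸ List.getElem_mem hclen)
      rw [dif_pos hclen, if_neg hne]
      rfl
    · rw [dif_neg hclen]
      rfl

-- A's per-query bisect result equals the first index of q in the sorted list (or -1).
theorem bisect_step_eq_index (data : List Int) (q : Int) :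
    (let s := PySem.List.sorted data (fun x => x)
     let d := PySem.List.bisectLeft s q
     (if h : d < s.length then (if s[d] = q then (d : Int) else -1) else -1))
      = ((PySem.List.index? (PySem.List.sorted data (fun x => x)) q).map (fun j => (j : Int))).getD (-1) :=
  bisect_core (PySem.List.sorted data (fun x => x)) q
    (PySem.List.sorted_pairwise data (fun x => x))
    (fun _ _ hpq hq => PySem.List.sorted_id_getElem_mono data hpq hq)

theorem solve_eq (data question : List Int) : solve data question = solve_alt data question := by
  unfold solve solve_alt
  rw [PySem.List.foldl_append_singleton_eq_map, List.nil_append]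
  apply List.map_congr_left
  intro q _
  rw [bisect_step_eq_index data q]
  rw [show ∀ (d : PySem.Dict Int Int) k v, d.getD k v = (d.get? k).getD v from fun _ _ _ => rfl]
  rw [setdefault_fold_get? _ 0 PySem.Dict.empty q]
  simp [PySem.Dict.get?_empty]

-- ===== VERDICT (by name: the statement is the Claim_ definition above) =====
theorem solve_spec : Claim_equal_solve := by
  intro data question _
  unfold Spec_solve
  exact solve_eq data question
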